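-- pv_equiv track=rewrite | github.com/git25math/25maths-examhub | scripts/export-latex-dryrun.py | normalize_latex
-- ===== SOURCE A (Python) =====
-- def normalize_latex(tex):
--     """Normalize LaTeX for comparison (strip whitespace variance)."""
--     lines = [l.rstrip() for l in tex.strip().split('\n')]
--     result = []
--     prev_blank = False
--     for l in lines:
--         if l == '':
--             if not prev_blank:
--                 result.append('')
--             prev_blank = True
--         else:
--             result.append(l)
--             prev_blank = False
--     return '\n'.join(result)
-- ===== SOURCE B (Python) =====
-- def normalize_latex(tex):
--     """Normalize LaTeX for comparison (strip whitespace variance)."""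
--     text = '\n'.join(l.rstrip() for l in tex.strip().split('\n'))
--     out = []
--     i = 0
--     while i < len(text):
--         c = text[i]
--         out.append(c)
--         i += 1
--         if c == '\n' and i < len(text) and text[i] == '\n':
--             out.append('\n')
--             i += 1
--             while i < len(text) and text[i] == '\n':
--                 i += 1
--     return ''.join(out)
-- ===== Notes on version B (the rewrite author's own statement) =====
-- stated objective: alternative
-- what changed: replaces A's stateful per-line prev_blank loop (conditionally appending lines to a result list) with a build-then-collapse decomposition: join the rstripped lines first, then collapse every run of 2+ newlines to exactly 2 in one character-level scan over the joined text
import Mathlib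
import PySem

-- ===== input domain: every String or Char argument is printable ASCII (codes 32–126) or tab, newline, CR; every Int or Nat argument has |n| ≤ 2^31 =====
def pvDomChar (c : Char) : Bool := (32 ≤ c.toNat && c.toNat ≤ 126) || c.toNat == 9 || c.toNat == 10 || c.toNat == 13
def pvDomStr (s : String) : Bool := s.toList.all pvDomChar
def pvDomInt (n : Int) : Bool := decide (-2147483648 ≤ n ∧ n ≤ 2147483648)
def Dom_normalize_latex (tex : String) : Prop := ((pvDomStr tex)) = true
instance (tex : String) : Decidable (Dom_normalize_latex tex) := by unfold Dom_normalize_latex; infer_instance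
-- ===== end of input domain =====

-- B replaces A's stateful per-line prev_blank loop by joining the rstripped lines and collapsing
-- every run of 2+ newlines to exactly 2 in one character-level scan (objective: alternative).

-- ===== PORT A =====
def normalize_latex (tex : String) : String :=
  -- lines = [l.rstrip() for l in tex.strip().split('\n')]
  let lines := (PySem.Chars.splitOn (PySem.Chars.strip tex.toList) ['\n']).map
    (fun l => PySem.Chars.rstrip l)
  -- result = []; prev_blank = False; for l in lines: …
  let st := lines.foldl (fun (st : List (List Char) × Bool) l =>
    if l = [] then
      (if st.2 then (st.1, true) else (st.1 ++ [([] : List Char)], true))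
    else (st.1 ++ [l], false)) ([], false)
  -- return '\n'.join(result)
  String.ofList (PySem.Chars.join ['\n'] st.1)

-- ===== PORT B =====
-- hand port of B's while-loop scan (no PySem primitive for it): copy a char; after a '\n'
-- immediately followed by '\n', emit that second '\n' and skip all further consecutive '\n'.
def pvCollapse : List Char → List Char
  | [] => []
  | [c] => [c]
  | c1 :: c2 :: rest =>
    if c1 = '\n' ∧ c2 = '\n' then
      c1 :: c2 :: pvCollapse (rest.dropWhile (· == '\n'))
    else c1 :: pvCollapse (c2 :: rest)
  termination_by l => l.length
  decreasing_by
  · simp only [List.length_cons]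
    have := List.length_dropWhile_le (· == '\n') rest
    omega
  · simp

def normalize_latex_alt (tex : String) : String :=
  -- text = '\n'.join(l.rstrip() for l in tex.strip().split('\n'))
  let text := PySem.Chars.join ['\n']
    ((PySem.Chars.splitOn (PySem.Chars.strip tex.toList) ['\n']).map
      (fun l => PySem.Chars.rstrip l))
  -- the while-loop scan over text
  String.ofList (pvCollapse text)

-- ===== PRECONDITION & SPEC =====
def Spec_normalize_latex (tex : String) (out : String) : Prop := out = normalize_latex_alt tex
instance (tex : String) (out : String) : Decidable (Spec_normalize_latex tex out) := by unfold Spec_normalize_latex; infer_instance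

-- ===== CLAIM (what is proved, stated in full; the proofs are below) =====
def Claim_equal_normalize_latex : Prop := ∀ (tex : String), Dom_normalize_latex tex → Spec_normalize_latex tex (normalize_latex tex)

-- ===== LEMMAS AND PROOFS =====

-- split of cs at '\n': (first piece, remaining pieces), structurally
def sp : List Char → List Char × List (List Char)
  | [] => ([], [])
  | c :: r => if c = '\n' then ([], (sp r).1 :: (sp r).2) else (c :: (sp r).1, (sp r).2)

-- '\n'-join of a list of lines, structurally
def Jn : List (List Char) → List Char
  | [] => []
  | [l] => l
  | l :: m :: rest => l ++ '\n' :: Jn (m :: rest)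

-- what A's prev_blank loop keeps: collapse each run of empty lines to one empty line
def dd : List (List Char) → List (List Char)
  | [] => []
  | l :: rest =>
    if l = [] then ([] : List Char) :: dd (rest.dropWhile (fun x => x.isEmpty))
    else l :: dd rest
  termination_by ls => ls.length
  decreasing_by
  · simp only [List.length_cons]
    have := List.length_dropWhile_le (fun x : List Char => x.isEmpty) rest
    omega
  · simp

theorem go_eq (fuel : Nat) : ∀ (l cur : List Char) (acc : List (List Char)), l.length < fuel →
    PySem.Chars.splitOn.go ['\n'] fuel l cur acc
      = acc.reverse ++ (cur.reverse ++ (sp l).1) :: (sp l).2 := by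
  induction fuel with
  | zero => intro l cur acc h; omega
  | succ f ih =>
    intro l cur acc h
    match l with
    | [] => simp [PySem.Chars.splitOn.go, sp]
    | c :: rest =>
      rw [PySem.Chars.splitOn.go]
      by_cases hc : c = '\n'
      · subst hc
        rw [show (['\n'].isPrefixOf ('\n'::rest)) = true by simp [List.isPrefixOf]]
        simp only [if_pos]
        rw [ih]
        · simp [sp]
        · simp at h ⊢; omega
      · rw [show (['\n'].isPrefixOf (c::rest)) = false by
          simp [List.isPrefixOf]; exact fun hh => absurd hh.symm hc]
        simp only [Bool.false_eq_true, if_false]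
        rw [ih]
        · simp [sp, hc]
        · simp at h ⊢; omega

theorem splitOn_eq (cs : List Char) :
    PySem.Chars.splitOn cs ['\n'] = (sp cs).1 :: (sp cs).2 := by
  rw [PySem.Chars.splitOn, go_eq] <;> simp

theorem Jn_nil : Jn [] = [] := rfl
theorem Jn_single (l : List Char) : Jn [l] = l := rfl
theorem Jn_cons₂ (l m : List Char) (rest : List (List Char)) :
    Jn (l :: m :: rest) = l ++ '\n' :: Jn (m :: rest) := rfl

theorem getLast?_cons_ne {α : Type} (l : α) (rest : List α) (h : rest ≠ []) :
    (l :: rest).getLast? = rest.getLast? := by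
  obtain ⟨a, t, rfl⟩ := List.exists_cons_of_ne_nil h
  simp

theorem Jn_eq_intercalate : ∀ ls : List (List Char), Jn ls = List.intercalate ['\n'] ls
  | [] => by simp [Jn_nil, List.intercalate]
  | [l] => by rw [Jn_single]; simp [List.intercalate]
  | l :: m :: rest => by
    rw [Jn_cons₂, Jn_eq_intercalate (m :: rest)]
    simp [List.intercalate, List.intersperse]

theorem join_eq (ls : List (List Char)) : PySem.Chars.join ['\n'] ls = Jn ls := by
  rw [Jn_eq_intercalate]; rfl

-- skipping a newline-free nonempty block
theorem collapse_append (l : List Char) (r : List Char) (hnl : '\n' ∉ l) (hne : l ≠ []) :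
    pvCollapse (l ++ r) = l ++ pvCollapse r := by
  induction l with
  | nil => exact absurd rfl hne
  | cons a t ih =>
    have ha : a ≠ '\n' := by intro h; exact hnl (h ▸ List.mem_cons_self)
    match t, r with
    | [], [] => simp [pvCollapse]
    | [], c :: r' => rw [List.cons_append, List.nil_append, pvCollapse]; simp [ha]
    | b :: t', r =>
      rw [List.cons_append, show (b :: t') ++ r = b :: (t' ++ r) from rfl, pvCollapse]
      simp only [ha, false_and, if_false]
      rw [show b :: (t' ++ r) = (b :: t') ++ r from rfl,
        ih (fun h => hnl (List.mem_cons_of_mem _ h)) (by simp)]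
      simp

theorem dd_nil : dd [] = [] := by rw [dd]
theorem dd_cons_ne (l : List Char) (rest : List (List Char)) (hl : l ≠ []) :
    dd (l :: rest) = l :: dd rest := by rw [dd, if_neg hl]
theorem dd_cons_nil (rest : List (List Char)) :
    dd (([] : List Char) :: rest) = ([] : List Char) :: dd (rest.dropWhile (fun x => x.isEmpty)) := by
  rw [dd, if_pos rfl]
theorem pvCollapse_nil : pvCollapse [] = [] := by rw [pvCollapse]

theorem dd_ne_nil (ls : List (List Char)) (h : ls ≠ []) : dd ls ≠ [] := by
  match ls with
  | l :: rest => rw [dd]; split <;> simp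

-- A's loop computes dd (starting from prev_blank = False), and from prev_blank = True it
-- first drops the leading empty lines.
theorem foldA (ls : List (List Char)) :
    (∀ acc, (ls.foldl (fun (st : List (List Char) × Bool) l =>
        if l = [] then (if st.2 then (st.1, true) else (st.1 ++ [([] : List Char)], true))
        else (st.1 ++ [l], false)) (acc, false)).1 = acc ++ dd ls) ∧
    (∀ acc, (ls.foldl (fun (st : List (List Char) × Bool) l =>
        if l = [] then (if st.2 then (st.1, true) else (st.1 ++ [([] : List Char)], true))
        else (st.1 ++ [l], false)) (acc, true)).1
      = acc ++ dd (ls.dropWhile (fun x => x.isEmpty))) := by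
  induction ls with
  | nil => simp [dd]
  | cons l rest ih =>
    by_cases hl : l = []
    · subst hl
      constructor
      · intro acc
        rw [List.foldl_cons]
        norm_num
        rw [ih.2, dd]
        simp
      · intro acc
        rw [List.foldl_cons]
        norm_num
        rw [ih.2]
        try simp [List.dropWhile]
    · constructor
      · intro acc
        simp only [List.foldl_cons, if_neg hl]
        rw [ih.1, dd, if_neg hl]
        simp
      · intro acc
        simp only [List.foldl_cons, if_neg hl]
        rw [ih.1, List.dropWhile_cons_of_neg (by simpa using hl), dd, if_neg hl]
        simp

-- dropping leading newlines of the join = dropping leading empty lines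
theorem dropNl_Jn (ls : List (List Char)) (hnl : ∀ p ∈ ls, '\n' ∉ p) (hne : ls ≠ [])
    (hlast : ls.getLast? ≠ some []) :
    (Jn ls).dropWhile (· == '\n') = Jn (ls.dropWhile (fun x => x.isEmpty)) ∧
    ls.dropWhile (fun x => x.isEmpty) ≠ [] ∧
    (ls.dropWhile (fun x => x.isEmpty)).head? ≠ some [] ∧
    (ls.dropWhile (fun x => x.isEmpty)).getLast? = ls.getLast? := by
  induction ls with
  | nil => exact absurd rfl hne
  | cons l rest ih =>
    by_cases hl : l = []
    · subst hl
      have hrest : rest ≠ [] := by rintro rfl; simp at hlast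
      have hlast' : rest.getLast? ≠ some [] := by
        rwa [getLast?_cons_ne _ _ hrest] at hlast
      have := ih (fun p hp => hnl p (List.mem_cons_of_mem _ hp)) hrest hlast'
      have hJ : Jn ([] :: rest) = '\n' :: Jn rest := by
        match rest with
        | m :: rest' => rw [Jn_cons₂]; rfl
      rw [hJ, List.dropWhile_cons_of_pos (by simp),
        List.dropWhile_cons_of_pos (by simp), getLast?_cons_ne _ _ hrest]
      exact this
    · obtain ⟨c, t, rfl⟩ := List.exists_cons_of_ne_nil hl
      have hc : c ≠ '\n' := fun h =>
        hnl _ List.mem_cons_self (h ▸ List.mem_cons_self)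
      have hdw : ((c :: t) :: rest).dropWhile (fun x : List Char => x.isEmpty)
          = (c :: t) :: rest := List.dropWhile_cons_of_neg (by simp)
      refine ⟨?_, by rw [hdw]; simp, by rw [hdw]; simp, by rw [hdw]⟩
      rw [hdw]
      have : (Jn ((c :: t) :: rest)).head? = some c := by
        match rest with
        | [] => rw [Jn_single]; rfl
        | m :: rest' => rw [Jn_cons₂]; rfl
      match hJ : Jn ((c :: t) :: rest) with
      | [] => simp [hJ] at this
      | d :: w =>
        rw [hJ] at this
        simp only [List.head?_cons, Option.some.injEq] at this
        rw [List.dropWhile_cons_of_neg (by simp [this, hc])]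

-- main lemma: the scan over the join equals the join of what A's loop keeps
theorem collapse_Jn (n : Nat) : ∀ ls : List (List Char), ls.length ≤ n →
    (∀ p ∈ ls, '\n' ∉ p) → ls.getLast? ≠ some [] → ls.head? ≠ some [] →
    pvCollapse (Jn ls) = Jn (dd ls) := by
  induction n with
  | zero =>
    intro ls hlen _ _ _
    have : ls = [] := List.length_eq_zero_iff.mp (Nat.le_zero.mp hlen)
    subst this
    simp [Jn_nil, pvCollapse, dd]
  | succ n ih =>
    intro ls hlen hnl hlast hhead
    match ls with
    | [] => simp [Jn_nil, pvCollapse, dd]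
    | [l] =>
      have hl : l ≠ [] := by simpa using hhead
      rw [Jn_single, dd_cons_ne _ _ hl, dd_nil, Jn_single]
      have := collapse_append l [] (hnl l List.mem_cons_self) hl
      simpa [pvCollapse_nil] using this
    | l :: m :: rest =>
      have hl : l ≠ [] := by simpa using hhead
      have hrest : (m :: rest) ≠ [] := by simp
      have hlast' : (m :: rest).getLast? ≠ some [] := by
        rwa [getLast?_cons_ne _ _ hrest] at hlast
      have hnl' : ∀ p ∈ m :: rest, '\n' ∉ p :=
        fun p hp => hnl p (List.mem_cons_of_mem _ hp)
      rw [Jn_cons₂, collapse_append l _ (hnl l List.mem_cons_self) hl]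
      by_cases hm : m = []
      · subst hm
        -- run of blank lines: the scan matches '\n','\n' and drops the rest of the run
        have hrest2 : rest ≠ [] := by
          rintro rfl; simp at hlast'
        have hJ : Jn ([] :: rest) = '\n' :: Jn rest := by
          match rest with
          | r :: rest' => rw [Jn_cons₂]; rfl
        have hlastr : rest.getLast? ≠ some [] := by
          rwa [getLast?_cons_ne _ _ hrest2] at hlast'
        obtain ⟨hdrop, hq_ne, hq_head, hq_last⟩ :=
          dropNl_Jn rest (fun p hp => hnl' p (List.mem_cons_of_mem _ hp)) hrest2 hlastr
        rw [hJ, pvCollapse, if_pos ⟨rfl, rfl⟩, hdrop]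
        have hq_len : (rest.dropWhile (fun x => x.isEmpty)).length ≤ n := by
          have h1 := List.length_dropWhile_le (fun x : List Char => x.isEmpty) rest
          simp only [List.length_cons] at hlen
          omega
        rw [ih _ hq_len
          (fun p hp => hnl' p (List.mem_cons_of_mem _ ((List.dropWhile_sublist _).mem hp)))
          (hq_last ▸ hlastr) hq_head]
        -- right-hand side
        rw [dd_cons_ne _ _ hl, dd_cons_nil]
        have hddq := dd_ne_nil _ hq_ne
        obtain ⟨d, w, hd⟩ := List.exists_cons_of_ne_nil hddq
        rw [hd, Jn_cons₂, Jn_cons₂]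
        simp
      · -- next line nonempty: the join continues with a non-newline character
        obtain ⟨c, t, rfl⟩ := List.exists_cons_of_ne_nil hm
        have hc : c ≠ '\n' := fun h =>
          hnl' _ List.mem_cons_self (h ▸ List.mem_cons_self)
        have hJhead : ∃ w, Jn ((c :: t) :: rest) = c :: w := by
          match rest with
          | [] => exact ⟨t, by rw [Jn_single]⟩
          | r :: rest' => exact ⟨t ++ '\n' :: Jn (r :: rest'), by rw [Jn_cons₂]; rfl⟩
        obtain ⟨w, hw⟩ := hJhead
        rw [hw, pvCollapse, if_neg (by simp [hc]), ← hw]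
        have hrec := ih ((c :: t) :: rest) (by simp at hlen ⊢; omega) hnl' hlast' (by simp)
        rw [hrec, dd_cons_ne _ _ hl]
        have := dd_ne_nil ((c :: t) :: rest) (by simp)
        obtain ⟨d, w', hd⟩ := List.exists_cons_of_ne_nil this
        rw [hd, Jn_cons₂]

-- no newline inside the pieces of sp
theorem sp_noNl (cs : List Char) :
    '\n' ∉ (sp cs).1 ∧ ∀ p ∈ (sp cs).2, '\n' ∉ p := by
  induction cs with
  | nil => simp [sp]
  | cons c r ih =>
    rw [sp]
    by_cases hc : c = '\n'
    · simp only [if_pos hc]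
      exact ⟨by simp, by
        intro p hp
        rcases List.mem_cons.mp hp with h | h
        · exact h ▸ ih.1
        · exact ih.2 p h⟩
    · simp only [if_neg hc]
      exact ⟨by
        intro h
        rcases List.mem_cons.mp h with h | h
        · exact hc h.symm
        · exact ih.1 h, ih.2⟩

theorem rstrip_subset (l : List Char) : ∀ x ∈ PySem.Chars.rstrip l, x ∈ l := by
  intro x hx
  simp only [PySem.Chars.rstrip, List.mem_reverse] at hx
  exact List.mem_reverse.mp ((List.dropWhile_sublist _).mem hx)

theorem head?_dropWhile {p : Char → Bool} {w : List Char} {a : Char}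
    (h : (w.dropWhile p).head? = some a) : p a = false := by
  induction w with
  | nil => simp at h
  | cons c t ih =>
    by_cases hc : p c
    · rw [List.dropWhile_cons_of_pos hc] at h; exact ih h
    · rw [List.dropWhile_cons_of_neg hc] at h
      simp only [List.head?_cons, Option.some.injEq] at h
      subst h; simpa using hc

theorem rstrip_ne_nil {l : List Char} {c : Char} (hc : c ∈ l)
    (hs : PySem.Chars.isspace c = false) : PySem.Chars.rstrip l ≠ [] := by
  simp only [PySem.Chars.rstrip, ne_eq, List.reverse_eq_nil_iff, List.dropWhile_eq_nil_iff]
  intro h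
  have := h c (List.mem_reverse.mpr hc)
  rw [hs] at this; exact absurd this (by simp)

-- head and last characters of strip s are not whitespace
theorem strip_head {s cs : List Char} {c : Char} (hcs : cs = PySem.Chars.strip s)
    (h : cs.head? = some c) : PySem.Chars.isspace c = false := by
  have hpre : cs <+: PySem.Chars.lstrip s := by
    rw [hcs, PySem.Chars.strip, PySem.Chars.rstrip]
    have : (PySem.Chars.lstrip s).reverse.dropWhile PySem.Chars.isspace
        <:+ (PySem.Chars.lstrip s).reverse := List.dropWhile_suffix _
    have := List.reverse_prefix.mpr this
    simpa using this
  obtain ⟨t, ht⟩ := hpre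
  have hhead : (PySem.Chars.lstrip s).head? = some c := by
    rw [← ht]
    match cs, h with
    | a :: w, h => simpa using h
  exact head?_dropWhile (p := PySem.Chars.isspace) (w := s) hhead

theorem strip_last {s cs : List Char} {c : Char} (hcs : cs = PySem.Chars.strip s)
    (h : cs.getLast? = some c) : PySem.Chars.isspace c = false := by
  have : cs.reverse.head? = some c := by rwa [List.head?_reverse]
  rw [hcs, PySem.Chars.strip, PySem.Chars.rstrip, List.reverse_reverse] at this
  exact head?_dropWhile this

-- the last piece of sp cs ends with the last character of cs
theorem sp_last (cs : List Char) : ∀ c, cs.getLast? = some c → c ≠ '\n' →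
    ∃ q, ((sp cs).1 :: (sp cs).2).getLast? = some q ∧ q.getLast? = some c := by
  induction cs with
  | nil => intro c h; simp at h
  | cons a r ih =>
    intro c h hc
    match r with
    | [] =>
      simp only [List.getLast?_singleton, Option.some.injEq] at h
      cases h
      rw [sp, if_neg hc]
      exact ⟨a :: (sp []).1, by simp [sp], by simp [sp]⟩
    | b :: r' =>
      have hr : (b :: r') ≠ [] := by simp
      rw [getLast?_cons_ne _ _ hr] at h
      obtain ⟨q, hq1, hq2⟩ := ih c h hc
      rw [sp]
      by_cases ha : a = '\n'
      · rw [if_pos ha]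
        exact ⟨q, by rw [getLast?_cons_ne _ _ (by simp)]; exact hq1, hq2⟩
      · rw [if_neg ha]
        match h2 : (sp (b :: r')).2 with
        | [] =>
          rw [h2] at hq1
          simp only [List.getLast?_singleton, Option.some.injEq] at hq1
          have hqne : q ≠ [] := by rintro rfl; simp at hq2
          refine ⟨a :: q, ?_, by rw [getLast?_cons_ne _ _ hqne]; exact hq2⟩
          simp [hq1]
        | p :: ps =>
          rw [h2] at hq1
          rw [getLast?_cons_ne _ _ (by simp)]
          rw [getLast?_cons_ne _ _ (by simp)] at hq1
          exact ⟨q, h2 ▸ hq1, hq2⟩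

theorem pv_main (tex : String) : normalize_latex tex = normalize_latex_alt tex := by
  rw [normalize_latex, normalize_latex_alt]
  simp only [splitOn_eq]
  generalize hcs : PySem.Chars.strip tex.toList = cs
  cases cs with
  | nil =>
    simp [sp, pvCollapse, PySem.Chars.rstrip]
  | cons c0 cs' =>
    set parts := ((sp (c0 :: cs')).1 :: (sp (c0 :: cs')).2).map
      (fun l => PySem.Chars.rstrip l) with hparts
    have hA := (foldA parts).1 []
    rw [List.nil_append] at hA
    rw [hA, join_eq, join_eq]
    have hnl : ∀ p ∈ parts, '\n' ∉ p := by
      intro p hp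
      rw [hparts] at hp
      simp only [List.mem_map] at hp
      obtain ⟨pq, hpq, rfl⟩ := hp
      intro hmem
      have hin := rstrip_subset pq _ hmem
      rcases List.mem_cons.mp hpq with h | h
      · exact (sp_noNl (c0 :: cs')).1 (h ▸ hin)
      · exact (sp_noNl (c0 :: cs')).2 pq h hin
    have hc0 : PySem.Chars.isspace c0 = false := strip_head hcs.symm rfl
    have hc0nl : c0 ≠ '\n' := by
      rintro rfl; simp [PySem.Chars.isspace] at hc0
    have hsp1 : (sp (c0 :: cs')).1 = c0 :: (sp cs').1 := by
      rw [sp, if_neg hc0nl]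
    have hhead : parts.head? ≠ some [] := by
      rw [hparts]
      simp only [List.map_cons, List.head?_cons, ne_eq, Option.some.injEq]
      rw [hsp1]
      exact rstrip_ne_nil List.mem_cons_self hc0
    obtain ⟨cl, hcl1⟩ : ∃ cl, (c0 :: cs').getLast? = some cl :=
      Option.isSome_iff_exists.mp (List.getLast?_isSome.mpr (by simp))
    have hcl2 : PySem.Chars.isspace cl = false := strip_last hcs.symm hcl1
    have hclnl : cl ≠ '\n' := by
      rintro rfl; simp [PySem.Chars.isspace] at hcl2
    obtain ⟨q, hq1, hq2⟩ := sp_last (c0 :: cs') cl hcl1 hclnl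
    have hlast : parts.getLast? ≠ some [] := by
      rw [hparts, List.getLast?_map, hq1]
      simp only [Option.map_some, ne_eq, Option.some.injEq]
      exact rstrip_ne_nil (List.mem_of_getLast? hq2) hcl2
    exact congrArg String.ofList
      (collapse_Jn parts.length parts le_rfl hnl hlast hhead).symm

-- ===== VERDICT (by name: the statement is the Claim_ definition above) =====
theorem normalize_latex_spec : Claim_equal_normalize_latex := by
  intro tex _
  unfold Spec_normalize_latex
  exact pv_main tex
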